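-- pv_equiv track=rewrite | github.com/shangbang21/python | Example01.py | numbers1
-- ===== SOURCE A (Python) =====
-- def numbers1(num):
-- 	L = []
-- 	for x in range(1, num):
-- 		for y in range(1, num):
-- 			for z in range(1, num):
-- 				if x != y and x!= z and y != z:
-- 				 	L.append(x * 100 + y * 10 + z)
-- 	sorted(L, reverse = False)
-- 	return L
-- ===== SOURCE B (Python) =====
-- def numbers1(num):
--     # Enumerate only the valid triples: pick a digit, then pick from the remainder.
--     def picks(l):
--         return [(l[i], l[:i] + l[i+1:]) for i in range(len(l))]
--     digits = list(range(1, num))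
--     return [x * 100 + y * 10 + z
--             for x, r1 in picks(digits)
--             for y, r2 in picks(r1)
--             for z in r2]
-- ===== Notes on version B (the rewrite author's own statement) =====
-- stated objective: alternative
-- what changed: B enumerates only the valid triples by picking a digit and recursing on the remainder (hand-rolled lexicographic permutations of the digit list) instead of A's triple nested loop over all combinations filtered by the all-distinct guard; A's discarded sorted() call is dropped.
import Mathlib
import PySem

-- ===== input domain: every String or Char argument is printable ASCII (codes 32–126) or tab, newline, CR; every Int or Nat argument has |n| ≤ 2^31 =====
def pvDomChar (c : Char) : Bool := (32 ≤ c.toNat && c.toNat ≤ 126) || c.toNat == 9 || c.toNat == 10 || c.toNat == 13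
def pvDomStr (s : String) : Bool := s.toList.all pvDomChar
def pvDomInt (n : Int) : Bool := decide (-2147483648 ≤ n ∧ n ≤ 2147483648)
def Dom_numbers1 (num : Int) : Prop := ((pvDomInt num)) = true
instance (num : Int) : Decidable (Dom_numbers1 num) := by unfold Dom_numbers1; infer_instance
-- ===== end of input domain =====

-- B replaces A's filter-all-triples nested loop by a pick-and-remove enumeration of
-- exactly the distinct triples (alternative algorithm, same asymptotic cost);
-- A's sorted() call is discarded by A itself and dropped in B.

-- ===== PORT A =====
def numbers1 (num : Int) : List Int :=
  let L : List Int :=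
    (PySem.List.pyRange 1 num 1).foldl (fun L x =>
      (PySem.List.pyRange 1 num 1).foldl (fun L y =>
        (PySem.List.pyRange 1 num 1).foldl (fun L z =>
          if x ≠ y ∧ x ≠ z ∧ y ≠ z then L ++ [x * 100 + y * 10 + z] else L) L) L) []
  let _ := PySem.List.sorted L (fun v => v) false  -- A's discarded 'sorted(L, reverse=False)'
  L

-- ===== PORT B =====
-- picks(l): each element paired with the rest of the list (that occurrence removed)
def picks (l : List Int) : List (Int × List Int) :=
  (PySem.List.pyRange 0 l.length 1).map (fun i =>
    (PySem.List.pyGetD l i 0,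
     PySem.List.slice l none (some i) ++ PySem.List.slice l (some (i + 1)) none))

def numbers1_alt (num : Int) : List Int :=
  let digits := PySem.List.pyRange 1 num 1
  (picks digits).flatMap (fun p =>
    (picks p.2).flatMap (fun q =>
      q.2.map (fun z => p.1 * 100 + q.1 * 10 + z)))

-- ===== PRECONDITION & SPEC =====
def Spec_numbers1 (num : Int) (out : List Int) : Prop := out = numbers1_alt num
instance (num : Int) (out : List Int) : Decidable (Spec_numbers1 num out) := by unfold Spec_numbers1; infer_instance

-- ===== CLAIM (what is proved, stated in full; the proofs are below) =====
def Claim_equal_numbers1 : Prop := ∀ (num : Int), Dom_numbers1 num → Spec_numbers1 num (numbers1 num)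

-- ===== LEMMAS AND PROOFS =====

-- on a duplicate-free list, picking an element = erasing it by value
theorem picks_of_nodup (l : List Int) (h : l.Nodup) :
    picks l = l.map (fun x => (x, l.erase x)) := by
  unfold picks
  apply List.ext_getElem
  · simp [PySem.List.length_pyRange_one]
  · intro i h1 h2
    have hi : i < l.length := by
      simpa [PySem.List.length_pyRange_one] using h1
    simp only [List.getElem_map, PySem.List.getElem_pyRange_one, zero_add,
      PySem.List.pyGetD_natCast, PySem.List.slice_to_natCast]
    have hcast : ((i : Int) + 1) = ((i + 1 : Nat) : Int) := by push_cast; ring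
    rw [hcast, PySem.List.slice_from_natCast, List.getD_eq_getElem _ _ hi]
    have he : l.take i ++ l.drop (i + 1) = l.erase l[i] := by
      rw [h.erase_getElem i hi, List.eraseIdx_eq_take_drop_succ]
    rw [he]

-- skipping one value inside a flatMap over a nodup list = flatMap over the erased list
theorem flatMap_skip (l : List Int) (h : l.Nodup) (x : Int) (g : Int → List Int) :
    l.flatMap (fun y => if y = x then [] else g y) = (l.erase x).flatMap g := by
  induction l with
  | nil => rfl
  | cons a t ih =>
      simp only [List.nodup_cons] at h
      by_cases hax : a = x
      · subst hax
        have ht : t.flatMap (fun y => if y = a then [] else g y) = t.flatMap g := by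
          refine List.flatMap_congr (fun y hy => ?_)
          have : y ≠ a := fun e => h.1 (e ▸ hy)
          simp [this]
        simp [ht]
      · rw [List.flatMap_cons, if_neg hax, ih h.2,
          List.erase_cons_tail (by simp [hax]), List.flatMap_cons]

theorem main_shape (l : List Int) (h : l.Nodup) :
    l.foldl (fun L x =>
      l.foldl (fun L y =>
        l.foldl (fun L z =>
          if x ≠ y ∧ x ≠ z ∧ y ≠ z then L ++ [x * 100 + y * 10 + z] else L) L) L) ([] : List Int)
    = (picks l).flatMap (fun p =>
        (picks p.2).flatMap (fun q =>
          q.2.map (fun z => p.1 * 100 + q.1 * 10 + z))) := by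
  -- turn A's folds into flatMaps
  have step : ∀ (init : List Int),
      l.foldl (fun L x =>
        l.foldl (fun L y =>
          l.foldl (fun L z =>
            if x ≠ y ∧ x ≠ z ∧ y ≠ z then L ++ [x * 100 + y * 10 + z] else L) L) L) init
      = init ++ l.flatMap (fun x => l.flatMap (fun y =>
          l.flatMap (fun z => if x ≠ y ∧ x ≠ z ∧ y ≠ z then [x * 100 + y * 10 + z] else []))) := by
    intro init
    have inner : ∀ (x y : Int) (L : List Int),
        l.foldl (fun L z =>
          if x ≠ y ∧ x ≠ z ∧ y ≠ z then L ++ [x * 100 + y * 10 + z] else L) L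
        = L ++ l.flatMap (fun z => if x ≠ y ∧ x ≠ z ∧ y ≠ z then [x * 100 + y * 10 + z] else []) := by
      intro x y L
      rw [← PySem.List.foldl_append_eq_flatMap]
      refine PySem.List.foldl_congr_mem _ _ _ _ (fun acc z _ => ?_)
      by_cases hc : x ≠ y ∧ x ≠ z ∧ y ≠ z <;> simp [hc]
    have mid : ∀ (x : Int) (L : List Int),
        l.foldl (fun L y =>
          l.foldl (fun L z =>
            if x ≠ y ∧ x ≠ z ∧ y ≠ z then L ++ [x * 100 + y * 10 + z] else L) L) L
        = L ++ l.flatMap (fun y =>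
            l.flatMap (fun z => if x ≠ y ∧ x ≠ z ∧ y ≠ z then [x * 100 + y * 10 + z] else [])) := by
      intro x L
      rw [← PySem.List.foldl_append_eq_flatMap]
      exact PySem.List.foldl_congr_mem _ _ _ _ (fun acc y _ => inner x y acc)
    rw [← PySem.List.foldl_append_eq_flatMap]
    exact PySem.List.foldl_congr_mem _ _ _ _ (fun acc x _ => mid x acc)
  rw [step, List.nil_append]
  -- rewrite B's side through picks_of_nodup
  rw [picks_of_nodup l h, List.flatMap_map]
  refine List.flatMap_congr (fun x hx => ?_)
  rw [picks_of_nodup _ (h.erase x), List.flatMap_map]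
  -- the y-level: skip y = x
  have ystep :
      l.flatMap (fun y =>
        l.flatMap (fun z => if x ≠ y ∧ x ≠ z ∧ y ≠ z then [x * 100 + y * 10 + z] else []))
      = (l.erase x).flatMap (fun y =>
          l.flatMap (fun z => if z = x then [] else if z = y then [] else [x * 100 + y * 10 + z])) := by
    rw [← flatMap_skip l h x]
    refine List.flatMap_congr (fun y _ => ?_)
    by_cases hyx : y = x
    · subst hyx; simp
    · simp only [if_neg hyx]
      refine List.flatMap_congr (fun z _ => ?_)
      by_cases hzx : z = x
      · subst hzx; simp [Ne.symm hyx]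
      · by_cases hzy : z = y
        · subst hzy; simp [hzx]
        · have h1 : x ≠ y := fun e => hyx e.symm
          have h2 : x ≠ z := fun e => hzx e.symm
          have h3 : y ≠ z := fun e => hzy e.symm
          simp [h1, h2, h3, hzx, hzy]
  rw [ystep]
  refine List.flatMap_congr (fun y hy => ?_)
  -- the z-level: skip z = x then z = y
  rw [flatMap_skip l h x, flatMap_skip _ (h.erase x) y]
  induction ((l.erase x).erase y) with
  | nil => rfl
  | cons a t ih => simp [ih]

-- ===== VERDICT (by name: the statement is the Claim_ definition above) =====
theorem numbers1_spec : Claim_equal_numbers1 := by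
  intro num _
  show numbers1 num = numbers1_alt num
  unfold numbers1 numbers1_alt
  exact main_shape _ (PySem.List.nodup_pyRange_one 1 num)
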